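-- pv_equiv track=rewrite | github.com/BackendSquid/AlgorithmChallenge | 수식최대화/pyro.py | expression2words
-- ===== SOURCE A (Python) =====
-- def expression2words(expression):
--     words = []
--     num_str = ""
--     for char in expression:
--         if char.isdecimal():
--             num_str += char
--         else:
--             words.append(num_str)
--             words.append(char)
--             num_str = ""
--     words.append(num_str)
--     return words
-- ===== SOURCE B (Python) =====
-- import re
--
-- def expression2words(expression):
--     # split on each single non-decimal char, keeping it via the capturing group
--     return re.split(r'(\D)', expression)
-- ===== Notes on version B (the rewrite author's own statement) =====
-- stated objective: idiomatic
-- what changed: Replaces the manual char-by-char accumulator loop with a single re.split(r'(\D)') call whose capturing group keeps each operator char and naturally emits the empty number tokens.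
import Mathlib
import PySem

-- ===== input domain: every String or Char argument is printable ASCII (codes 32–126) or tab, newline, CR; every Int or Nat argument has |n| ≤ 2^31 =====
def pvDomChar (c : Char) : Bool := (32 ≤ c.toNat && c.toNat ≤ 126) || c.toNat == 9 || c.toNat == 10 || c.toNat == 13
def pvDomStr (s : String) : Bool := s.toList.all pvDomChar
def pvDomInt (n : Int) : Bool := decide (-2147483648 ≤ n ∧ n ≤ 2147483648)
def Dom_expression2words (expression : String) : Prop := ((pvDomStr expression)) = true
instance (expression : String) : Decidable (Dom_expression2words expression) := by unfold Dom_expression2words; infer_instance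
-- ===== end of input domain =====

-- B replaces the manual accumulator loop with a regex split on '(\D)' keeping each
-- delimiter char (objective: idiomatic). On the ASCII domain isdecimal = PySem.Chars.isdigit.

-- ===== PORT A =====
-- fold over the chars of the expression, state = (words so far, current number string)
def expression2words (expression : String) : List String :=
  let st := expression.toList.foldl
    (fun (st : List String × String) c =>
      if PySem.Chars.isdigit c then (st.1, st.2.push c)
      else (st.1 ++ [st.2, c.toString], ""))
    ([], "")
  st.1 ++ [st.2]

-- ===== PORT B =====
-- hand port of re.split(r'(\D)', s) (no regex library in Lean): the split with a
-- single-char delimiter class '\D' and a capturing group, transcribed exactly: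
-- every non-digit char becomes its own token, with the (possibly empty) digit run
-- field before it; the final (possibly empty) digit field closes the list.
def reSplitNonDigit : List Char → List String
  | [] => [""]
  | c :: cs =>
      if PySem.Chars.isdigit c then
        (c.toString ++ (reSplitNonDigit cs).headI) :: (reSplitNonDigit cs).tail
      else
        "" :: c.toString :: reSplitNonDigit cs

def expression2words_alt (expression : String) : List String :=
  reSplitNonDigit expression.toList

-- ===== PRECONDITION & SPEC =====
def Spec_expression2words (expression : String) (out : List String) : Prop := out = expression2words_alt expression
instance (expression : String) (out : List String) : Decidable (Spec_expression2words expression out) := by unfold Spec_expression2words; infer_instance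

-- ===== CLAIM (what is proved, stated in full; the proofs are below) =====
def Claim_equal_expression2words : Prop := ∀ (expression : String), Dom_expression2words expression → Spec_expression2words expression (expression2words expression)

-- ===== LEMMAS AND PROOFS =====

theorem reSplitNonDigit_ne_nil (cs : List Char) : reSplitNonDigit cs ≠ [] := by
  cases cs with
  | nil => simp [reSplitNonDigit]
  | cons c cs => simp only [reSplitNonDigit]; split <;> simp

theorem pv_push_eq (s : String) (c : Char) : s.push c = s ++ c.toString := by
  apply String.ext
  simp [String.push, Char.toString]

theorem expression2words_key (cs : List Char) : ∀ (ws : List String) (num : String),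
    (let st := cs.foldl
      (fun (st : List String × String) c =>
        if PySem.Chars.isdigit c then (st.1, st.2.push c)
        else (st.1 ++ [st.2, c.toString], ""))
      (ws, num)
     st.1 ++ [st.2])
    = ws ++ (num ++ (reSplitNonDigit cs).headI) :: (reSplitNonDigit cs).tail := by
  induction cs with
  | nil => intro ws num; simp [reSplitNonDigit]
  | cons c cs ih =>
    intro ws num
    simp only [List.foldl_cons, reSplitNonDigit]
    by_cases h : PySem.Chars.isdigit c = true
    all_goals cases h2 : reSplitNonDigit cs with
    | nil => exact absurd h2 (reSplitNonDigit_ne_nil _)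
    | cons hd tl =>
      simp only [h, if_true, if_false, Bool.false_eq_true]
      rw [ih, h2]
      simp only [List.headI, List.tail_cons]
      try rw [pv_push_eq, String.append_assoc]
      try simp

theorem expression2words_spec : Claim_equal_expression2words := by
  intro e _
  unfold Spec_expression2words expression2words expression2words_alt
  rw [expression2words_key]
  cases h : reSplitNonDigit e.toList with
  | nil => exact absurd h (reSplitNonDigit_ne_nil _)
  | cons hd tl => simp
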